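-- pv_equiv track=rewrite | github.com/hama-jp/s_style_agent | s_style_agent/core/agent_service.py | _extract_s_expression_from_response
-- ===== SOURCE A (Python) =====
-- def _extract_s_expression_from_response(response: str) -> str:
--     """
--     LLMレスポンスからS式を抽出
--
--     Args:
--         response: LLMの回答全文
--
--     Returns:
--         抽出されたS式
--     """
--     lines = response.strip().split('\n')
--
--     # 括弧で始まる最初の行を探す
--     for line in lines:
--         line = line.strip()
--         if line.startswith('(') and line.endswith(')'):
--             return line
--
--     # 見つからない場合、括弧で始まる最初の部分を探す
--     for line in lines:
--         line = line.strip()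
--         if line.startswith('('):
--             # 括弧の対応をチェックして補完
--             open_count = line.count('(')
--             close_count = line.count(')')
--             if open_count > close_count:
--                 # 不足分の括弧を追加
--                 line += ')' * (open_count - close_count)
--             return line
--
--     # それでも見つからない場合、元のレスポンスをそのまま返す
--     return response.strip()
-- ===== SOURCE B (Python) =====
-- def _extract_s_expression_from_response(response: str) -> str:
--     """Single pass with a fallback variable instead of two sequential scans."""
--     fallback = None
--     for raw in response.strip().split('\n'):
--         line = raw.strip()
--         if line.startswith('('):
--             if line.endswith(')'):
--                 return line
--             if fallback is None:
--                 fallback = line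
--     if fallback is not None:
--         missing = fallback.count('(') - fallback.count(')')
--         if missing > 0:
--             fallback += ')' * missing
--         return fallback
--     return response.strip()
-- ===== Notes on version B (the rewrite author's own statement) =====
-- stated objective: simpler
-- what changed: A's two sequential scans over the lines (first for a fully bracketed line, then for any open-paren line to complete) are merged into one scan that returns a fully bracketed line immediately and remembers the first open-paren line as a fallback to complete after the loop.
import Mathlib
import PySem

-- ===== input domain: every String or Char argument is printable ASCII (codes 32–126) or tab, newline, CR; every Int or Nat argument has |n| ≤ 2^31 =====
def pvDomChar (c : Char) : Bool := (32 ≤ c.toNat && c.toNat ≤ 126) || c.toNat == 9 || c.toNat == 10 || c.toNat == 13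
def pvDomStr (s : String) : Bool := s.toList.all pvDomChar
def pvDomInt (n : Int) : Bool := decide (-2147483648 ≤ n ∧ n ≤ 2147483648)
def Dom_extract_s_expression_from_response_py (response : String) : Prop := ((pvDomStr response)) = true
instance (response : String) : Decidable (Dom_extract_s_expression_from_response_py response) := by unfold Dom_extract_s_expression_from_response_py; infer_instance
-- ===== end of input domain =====

-- B replaces A's two sequential scans over the lines by one scan carrying a fallback variable (objective: simpler single pass, same cost).

-- shared paren-completion step: line + ')' * (open_count - close_count) when open > close
def pvComplete (line : List Char) : List Char :=
  let openCount : Nat := PySem.Chars.count line ['(']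
  let closeCount : Nat := PySem.Chars.count line [')']
  if closeCount < openCount then
    line ++ PySem.List.pyRepeat [')'] ((openCount : Int) - (closeCount : Int))
  else line

-- ===== PORT A =====
-- first loop: the first stripped line that starts with '(' and ends with ')'
def pvLoop1 : List (List Char) → Option (List Char)
  | [] => none
  | l :: ls =>
    let line := PySem.Chars.strip l
    if PySem.Chars.startswith line ['('] && PySem.Chars.endswith line [')'] then some line
    else pvLoop1 ls

-- second loop: the first stripped line that starts with '(', paren-completed
def pvLoop2 : List (List Char) → Option (List Char)
  | [] => none
  | l :: ls =>
    let line := PySem.Chars.strip l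
    if PySem.Chars.startswith line ['('] then some (pvComplete line)
    else pvLoop2 ls

def extract_s_expression_from_response_py (response : String) : String :=
  let lines := PySem.Chars.splitOn (PySem.Chars.strip response.toList) ['\n']
  match pvLoop1 lines with
  | some l => String.ofList l
  | none =>
    match pvLoop2 lines with
    | some l => String.ofList l
    | none => String.ofList (PySem.Chars.strip response.toList)

-- ===== PORT B =====
-- single pass: return a fully bracketed line at once, remember the first open-only line as fallback
def pvAltGo : List (List Char) → Option (List Char) → List Char → List Char
  | [], fallback, respStripped =>
    match fallback with
    | some f => pvComplete f
    | none => respStripped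
  | raw :: ls, fallback, respStripped =>
    let line := PySem.Chars.strip raw
    if PySem.Chars.startswith line ['('] then
      if PySem.Chars.endswith line [')'] then line
      else pvAltGo ls (some (fallback.getD line)) respStripped
    else pvAltGo ls fallback respStripped

def extract_s_expression_from_response_py_alt (response : String) : String :=
  let stripped := PySem.Chars.strip response.toList
  String.ofList (pvAltGo (PySem.Chars.splitOn stripped ['\n']) none stripped)

-- ===== PRECONDITION & SPEC =====
def Spec_extract_s_expression_from_response_py (response : String) (out : String) : Prop := out = extract_s_expression_from_response_py_alt response
instance (response : String) (out : String) : Decidable (Spec_extract_s_expression_from_response_py response out) := by unfold Spec_extract_s_expression_from_response_py; infer_instance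

-- ===== CLAIM (what is proved, stated in full; the proofs are below) =====
def Claim_equal_extract_s_expression_from_response_py : Prop := ∀ (response : String), Dom_extract_s_expression_from_response_py response → Spec_extract_s_expression_from_response_py response (extract_s_expression_from_response_py response)

-- ===== LEMMAS AND PROOFS =====

-- the single pass equals: first full-bracket line, else the recorded fallback, else A's second loop, else the stripped response
theorem pvAltGo_eq (lines : List (List Char)) (fb : Option (List Char)) (resp0 : List Char) :
    pvAltGo lines fb resp0 =
      match pvLoop1 lines with
      | some l => l
      | none =>
        match fb with
        | some f => pvComplete f
        | none =>
          match pvLoop2 lines with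
          | some l => l
          | none => resp0 := by
  induction lines generalizing fb with
  | nil => cases fb <;> simp [pvAltGo, pvLoop1, pvLoop2]
  | cons raw ls ih =>
    simp only [pvAltGo, pvLoop1, pvLoop2]
    by_cases hs : PySem.Chars.startswith (PySem.Chars.strip raw) ['('] = true
    · by_cases he : PySem.Chars.endswith (PySem.Chars.strip raw) [')'] = true
      · simp [hs, he]
      · simp only [hs, he, Bool.and_false, if_true, if_false, Bool.false_eq_true]
        rw [ih]
        cases fb <;> cases h1 : pvLoop1 ls <;> simp [Option.getD]
    · simp only [Bool.not_eq_true] at hs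
      simp only [hs, Bool.false_and, Bool.false_eq_true, if_false]
      rw [ih]

theorem pvAltGo_eq_ports (response : String) :
    extract_s_expression_from_response_py response = extract_s_expression_from_response_py_alt response := by
  unfold extract_s_expression_from_response_py extract_s_expression_from_response_py_alt
  simp only [pvAltGo_eq]
  cases h1 : pvLoop1 (PySem.Chars.splitOn (PySem.Chars.strip response.toList) ['\n']) <;>
    cases h2 : pvLoop2 (PySem.Chars.splitOn (PySem.Chars.strip response.toList) ['\n']) <;>
    simp

-- ===== VERDICT (by name: the statement is the Claim_ definition above) =====
theorem extract_s_expression_from_response_py_spec : Claim_equal_extract_s_expression_from_response_py := by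
  intro response _
  unfold Spec_extract_s_expression_from_response_py
  exact pvAltGo_eq_ports response
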